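-- pv_equiv track=rewrite | github.com/Chris2Rich/practise | IOI Practise/BIO/21.py | pat
-- ===== SOURCE A (Python) =====
-- import math
--
-- def pat(s):
--     if(len(s) == 1):
--         return True
--     n = math.ceil(len(s) / 2)
--     l = s[:n]
--     r = s[n:]
--     if(sorted(list(set(l))) < sorted(list(set(r)))):
--         return False
--     return pat(l[::-1]) and pat(r[::-1])
-- ===== SOURCE B (Python) =====
-- def _collect(t, acc):
--     # Stage 1: gather every node of the split tree into acc.
--     acc.append(t)
--     if len(t) > 1:
--         n = (len(t) + 1) // 2  # math.ceil(len(t) / 2)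
--         _collect(t[:n][::-1], acc)
--         _collect(t[n:][::-1], acc)
--     return acc
--
-- def _ok(t):
--     # Stage 2 predicate: the ordering test A performs at one node.
--     if len(t) <= 1:
--         return True
--     n = (len(t) + 1) // 2
--     return not (sorted(set(t[:n])) < sorted(set(t[n:])))
--
-- def pat(s):
--     # The recursion is an AND over all tree nodes: build the node list, then test all.
--     return all(map(_ok, _collect(s, [])))
-- ===== Notes on version B (the rewrite author's own statement) =====
-- stated objective: alternative
-- what changed: Replaces A's recursive AND with two staged passes: first collect every node of the split tree into a list, then test the ordering predicate over that list with all(); same asymptotic cost.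
import Mathlib
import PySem

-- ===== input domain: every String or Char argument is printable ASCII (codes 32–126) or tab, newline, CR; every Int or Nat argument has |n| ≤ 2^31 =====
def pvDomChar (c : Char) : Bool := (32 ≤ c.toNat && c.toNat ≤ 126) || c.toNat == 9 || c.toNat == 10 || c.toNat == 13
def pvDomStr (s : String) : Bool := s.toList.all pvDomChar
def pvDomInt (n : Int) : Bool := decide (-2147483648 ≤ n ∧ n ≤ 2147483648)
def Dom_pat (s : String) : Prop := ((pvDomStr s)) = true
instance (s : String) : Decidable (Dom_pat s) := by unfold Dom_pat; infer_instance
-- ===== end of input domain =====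

-- B replaces A's recursive AND by two staged passes (collect all split-tree nodes, then test
-- the ordering predicate over the list); objective: alternative, same values on Pre_.

-- Shared primitive (both Pythons evaluate the expression `sorted(set(x)) < sorted(set(y))`):
-- Python's `<` on lists of chars, lexicographic by code point.
def pyListLt : List Char → List Char → Bool
  | [], [] => false
  | [], _ :: _ => true
  | _ :: _, [] => false
  | a :: as, b :: bs => if a < b then true else if b < a then false else pyListLt as bs

-- `sorted(list(set(x))) < sorted(list(set(y)))`
def splitLt (x y : List Char) : Bool :=
  pyListLt (PySem.List.sorted (PySem.Set.ofList x) (fun c => c) false)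
           (PySem.List.sorted (PySem.Set.ofList y) (fun c => c) false)

-- ===== PORT A =====
-- A's recursion, with a fuel totality guard: on nonempty input the recursion depth is ≤ len(s),
-- so fuel = len(s) is never exhausted inside Pre_; on '' Python A recurses forever (RecursionError).
def patRec : Nat → List Char → Bool
  | 0, _ => true
  | f + 1, cs =>
    if cs.length == 1 then true
    else
      let n := (cs.length + 1) / 2      -- math.ceil(len(s) / 2)
      let l := cs.take n                 -- s[:n]
      let r := cs.drop n                 -- s[n:]
      if splitLt l r then false
      else patRec f l.reverse && patRec f r.reverse   -- pat(l[::-1]) and pat(r[::-1])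

def pat (s : String) : Bool := patRec s.toList.length s.toList

-- ===== PORT B =====
-- stage 1 of Source B (_collect): the list of every node of the split tree, parent before children.
def collectNodes (t : List Char) : List (List Char) :=
  t :: (if h : 1 < t.length then
          collectNodes (t.take ((t.length + 1) / 2)).reverse
            ++ collectNodes (t.drop ((t.length + 1) / 2)).reverse
        else [])
termination_by t.length
decreasing_by
  · simp only [List.length_reverse, List.length_take]; omega
  · simp only [List.length_reverse, List.length_drop]; omega

-- stage 2 of Source B (_ok): the ordering test at one node.
def okNode (t : List Char) : Bool :=
  if t.length ≤ 1 then true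
  else !(splitLt (t.take ((t.length + 1) / 2)) (t.drop ((t.length + 1) / 2)))

def pat_alt (s : String) : Bool := (collectNodes s.toList).all okNode

-- ===== PRECONDITION & SPEC =====
-- Pre_ excludes only the empty string, on which Python A raises RecursionError (infinite recursion).
def Pre_pat (s : String) : Prop := s ≠ ""
instance (s : String) : Decidable (Pre_pat s) := by unfold Pre_pat; infer_instance
def pvWitness_pat : String := "ab"

def Spec_pat (s : String) (out : Bool) : Prop := out = pat_alt s
instance (s : String) (out : Bool) : Decidable (Spec_pat s out) := by unfold Spec_pat; infer_instance

-- ===== CLAIM (what is proved, stated in full; the proofs are below) =====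
def Claim_equal_pat : Prop := ∀ (s : String), Dom_pat s → Pre_pat s → Spec_pat s (pat s)

-- ===== LEMMAS AND PROOFS =====

-- the value A computes at one node, as a clean recursion on the substring (proof vehicle)
def gNode (cs : List Char) : Bool :=
  if h : cs.length ≤ 1 then true
  else
    if splitLt (cs.take ((cs.length + 1) / 2)) (cs.drop ((cs.length + 1) / 2)) then false
    else gNode (cs.take ((cs.length + 1) / 2)).reverse && gNode (cs.drop ((cs.length + 1) / 2)).reverse
termination_by cs.length
decreasing_by
  · simp only [List.length_reverse, List.length_take]; omega
  · simp only [List.length_reverse, List.length_drop]; omega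

theorem gNode_small {cs : List Char} (h : cs.length ≤ 1) : gNode cs = true := by
  rw [gNode]; simp [h]

theorem gNode_big {cs : List Char} (h : ¬ cs.length ≤ 1) :
    gNode cs = (if splitLt (cs.take ((cs.length + 1) / 2)) (cs.drop ((cs.length + 1) / 2)) then false
      else gNode (cs.take ((cs.length + 1) / 2)).reverse && gNode (cs.drop ((cs.length + 1) / 2)).reverse) := by
  rw [gNode]; simp [h]

-- staged B = gNode: the AND of okNode over the collected nodes is A's node value
theorem allNodes_eq_gNode : ∀ (m : Nat) (t : List Char), t.length = m →
    (collectNodes t).all okNode = gNode t := by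
  intro m
  induction m using Nat.strong_induction_on with
  | _ m ih =>
    intro t ht
    by_cases h : 1 < t.length
    · have hns : ¬ t.length ≤ 1 := by omega
      rw [collectNodes]
      simp only [h, dif_pos, List.all_cons, List.all_append]
      set n := (t.length + 1) / 2 with hn
      have hlen1 : (t.take n).reverse.length = n := by
        simp only [List.length_reverse, List.length_take]; omega
      have hlen2 : (t.drop n).reverse.length = t.length - n := by
        simp only [List.length_reverse, List.length_drop]
      rw [ih n (by omega) _ hlen1, ih (t.length - n) (by omega) _ hlen2,
        gNode_big hns]
      by_cases hlt : splitLt (t.take n) (t.drop n) = true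
      · simp [okNode, hns, hlt, ← hn]
      · simp only [Bool.not_eq_true] at hlt
        simp [okNode, hns, hlt, ← hn]
    · have hs : t.length ≤ 1 := by omega
      rw [collectNodes, gNode_small hs]
      simp [h, okNode, hs]

-- fuel irrelevance for A's port: fuel ≥ length suffices on nonempty input
theorem patRec_eq_gNode : ∀ (f : Nat) (cs : List Char), cs.length ≤ f → cs ≠ [] →
    patRec f cs = gNode cs := by
  intro f
  induction f with
  | zero =>
    intro cs hle hne
    exact absurd (List.length_eq_zero_iff.mp (by omega)) hne
  | succ f ih =>
    intro cs hle hne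
    have hpos : 0 < cs.length := List.length_pos_of_ne_nil hne
    by_cases h1 : cs.length = 1
    · rw [gNode_small (by omega)]
      simp [patRec, h1]
    · have hbig : ¬ cs.length ≤ 1 := by omega
      rw [gNode_big hbig]
      simp only [patRec, beq_iff_eq, h1, if_false]
      set n := (cs.length + 1) / 2 with hn
      by_cases hlt : splitLt (cs.take n) (cs.drop n) = true
      · simp [hlt]
      · simp only [Bool.not_eq_true] at hlt
        simp only [hlt, Bool.false_eq_true, if_false]
        have hlen1 : (cs.take n).reverse.length = n := by
          simp only [List.length_reverse, List.length_take]; omega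
        have hlen2 : (cs.drop n).reverse.length = cs.length - n := by
          simp only [List.length_reverse, List.length_drop]
        rw [ih ((cs.take n).reverse) (by rw [hlen1]; omega)
              (List.ne_nil_of_length_pos (by rw [hlen1]; omega)),
          ih ((cs.drop n).reverse) (by rw [hlen2]; omega)
              (List.ne_nil_of_length_pos (by rw [hlen2]; omega))]

theorem toList_ne_nil {s : String} (h : s ≠ "") : s.toList ≠ [] := by
  simp [String.toList_eq_nil_iff]; exact h

-- ===== VERDICT (by name: the statement is the Claim_ definition above) =====
theorem pat_spec : Claim_equal_pat := by
  intro s _ hpre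
  unfold Spec_pat pat pat_alt
  rw [patRec_eq_gNode _ _ (le_refl _) (toList_ne_nil hpre),
    allNodes_eq_gNode s.toList.length s.toList rfl]
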